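-- pv_equiv track=rewrite | github.com/kmzn128/atcoder | b050/c.py | Main
-- ===== SOURCE A (Python) =====
-- from collections import Counter
--
-- class Mint:
--
--     MOD = 10**9+7
--
--     def __init__(self, x=0):
--         self.x = (x%self.MOD + self.MOD) % self.MOD
--
--     def __iadd__(self, other):
--         self.x += other.x
--         if self.x >= self.MOD:
--             self.x -= self.MOD
--         return self
--
--     def __isub__(self, other):
--         self.x += self.MOD - other.x
--         if (self.x >= self.MOD):
--             self.x -= self.MOD
--         return self
--
--     def __imul__(self, other):
--         self.x *= other.x
--         self.x %= self.MOD;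
--         return self;
--
--     def __add__(self, other):
--         ans = Mint(self.x)
--         ans += other
--         return ans
--
--     def __sub__(self, other):
--         ans = Mint(self.x)
--         ans -= other
--         return ans
--
--     def __mul__(self, other):
--         ans = Mint(self.x)
--         ans *= other
--         return ans
--
--     def __pow__(self, n):
--         if n == 0:
--             return Mint(1)
--         a = self.__pow__(n >> 1)
--         a *= a
--         if n&1:
--             a *= self
--         return a
--
--     def inv(self):
--         return self**(self.MOD-2)
--
--     def __ifloordiv__(self, other):
--         self *= other.inv()
--         return self
--
--     def __floordiv__(self, other):
--         ans = Mint(self.x)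
--         ans //= other
--         return ans
--
-- def Main(N, A):
--     counter = Counter(A)
--     if len(A)%2 == 0:
--         v = counter.values()
--         s = set(v)
--         if len(s) > 1:
--             return 0
--         else:
--             k = list(counter.keys())
--             k.sort()
--             for i, e in enumerate(k):
--                 if e != 2*i+1:
--                     return 0
--             return (Mint(2)**(len(A)//2)).x
--     else:
--         if 0 not in counter:
--             return 0
--         if 0 in counter and counter[0] != 1:
--             return 0
--         del counter[0]
--         v = counter.values()
--         s = set(v)
--         if len(s) > 1:
--             return 0
--         else:
--             k = list(counter.keys())
--             k.sort()
--             for i, e in enumerate(k):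
--                 if e != 2*(i+1):
--                     return 0
--             return (Mint(2)**(len(A)//2)).x
-- ===== SOURCE B (Python) =====
-- def Main(N, A):
--     counts = {}
--     for x in A:
--         counts[x] = counts.get(x, 0) + 1
--     n = len(A)
--     odd = n % 2
--     if odd:
--         if counts.pop(0, None) != 1:
--             return 0
--     d = len(counts)
--     items = list(counts.items())
--     c0 = items[0][1] if items else 0
--     if all(v == c0 and k % 2 == 1 - odd and 1 <= k and k <= 2 * d - 1 + odd
--            for k, v in items):
--         return pow(2, n // 2, 10**9 + 7)
--     return 0
-- ===== Notes on version B (the rewrite author's own statement) =====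
-- stated objective: simpler
-- what changed: B replaces A's two-stage validation (set of counter values, then sort the keys and scan them against an enumerate index formula) by one pass over the counter's items testing each key with a closed-form parity/bound condition and each count against the first count, and replaces the Mint class's recursive square-and-multiply power by the builtin three-argument pow; the sort disappears entirely.
import Mathlib
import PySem

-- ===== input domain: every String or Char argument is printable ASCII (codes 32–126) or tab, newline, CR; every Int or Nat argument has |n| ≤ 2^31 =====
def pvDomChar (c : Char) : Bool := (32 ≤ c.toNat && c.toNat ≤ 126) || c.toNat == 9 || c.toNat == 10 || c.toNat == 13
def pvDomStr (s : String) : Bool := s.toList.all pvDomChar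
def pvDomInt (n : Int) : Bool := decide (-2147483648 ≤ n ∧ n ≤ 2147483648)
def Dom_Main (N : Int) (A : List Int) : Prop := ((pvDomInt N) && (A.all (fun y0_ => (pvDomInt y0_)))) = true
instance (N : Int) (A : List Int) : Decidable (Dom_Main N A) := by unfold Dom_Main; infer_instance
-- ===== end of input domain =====

-- B replaces A's sort-then-index-scan key check and value-set test by a single pass over the
-- counter's items with a closed-form parity/bound test, and Mint's recursive pow by builtin pow
-- (objective: simpler, no sort).

-- ===== PORT A =====
-- (Mint(2) ** n).x : Mint.__pow__ transliterated with self = Mint(2)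
def mintPow2 (n : Nat) : Int :=
  if h : n = 0 then 1
  else
    let a := mintPow2 (n / 2)
    let a := a * a % 1000000007
    if n % 2 = 1 then a * 2 % 1000000007 else a
decreasing_by exact Nat.div_lt_self (Nat.pos_of_ne_zero h) one_lt_two

-- even branch: 'for i, e in enumerate(k): if e != 2*i+1: return 0'
def scanOdd1 : List (Int × Int) → Bool
  | [] => true
  | (i, e) :: rest => if e ≠ 2 * i + 1 then false else scanOdd1 rest

-- odd branch: 'for i, e in enumerate(k): if e != 2*(i+1): return 0'
def scanEven2 : List (Int × Int) → Bool
  | [] => true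
  | (i, e) :: rest => if e ≠ 2 * (i + 1) then false else scanEven2 rest

def Main (N : Int) (A : List Int) : Int :=
  let counter := PySem.Dict.counter A
  if A.length % 2 = 0 then
    let v := counter.values
    let s := PySem.Set.ofList v
    if s.length > 1 then 0
    else
      let k := PySem.List.sorted counter.keys (fun x => x) false
      if scanOdd1 (PySem.List.enumerate k) then mintPow2 (A.length / 2) else 0
  else
    if ¬ (counter.contains 0 = true) then 0
    else if counter.contains 0 = true ∧ counter.getD 0 0 ≠ 1 then 0
    else
      let counter' := counter.erase 0
      let v := counter'.values
      let s := PySem.Set.ofList v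
      if s.length > 1 then 0
      else
        let k := PySem.List.sorted counter'.keys (fun x => x) false
        if scanEven2 (PySem.List.enumerate k) then mintPow2 (A.length / 2) else 0

-- ===== PORT B =====
-- the part of Source B after the odd-length zero handling: the single all(...) pass
-- ('items[0][1] if items else 0' is ported as (items.headD (0, 0)).2)
def finishB (counts : PySem.Dict Int Int) (n : Nat) (odd : Int) : Int :=
  let d : Int := counts.size
  let items := counts.items
  let c0 : Int := (items.headD (0, 0)).2
  if items.all (fun kv =>
       kv.2 == c0 && (PySem.Int.mod kv.1 2 == 1 - odd) &&
       decide (1 ≤ kv.1) && decide (kv.1 ≤ 2 * d - 1 + odd))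
  then PySem.Int.powMod 2 (n / 2) 1000000007   -- pow(2, n // 2, 10**9 + 7)
  else 0

def Main_alt (N : Int) (A : List Int) : Int :=
  let counts := A.foldl (fun d x => d.insert x (d.getD x 0 + 1)) PySem.Dict.empty
  let n := A.length
  let odd : Int := PySem.Int.mod (n : Int) 2
  if odd ≠ 0 then
    -- counts.pop(0, None): its value is counts.get? 0 (none when absent), its mutation is counts.erase 0
    if counts.get? 0 ≠ some 1 then 0
    else finishB (counts.erase 0) n odd
  else finishB counts n odd

-- ===== PRECONDITION & SPEC =====
def Spec_Main (N : Int) (A : List Int) (out : Int) : Prop := out = Main_alt N A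
instance (N : Int) (A : List Int) (out : Int) : Decidable (Spec_Main N A out) := by unfold Spec_Main; infer_instance

-- ===== CLAIM (what is proved, stated in full; the proofs are below) =====
def Claim_equal_Main : Prop := ∀ (N : Int) (A : List Int), Dom_Main N A → Spec_Main N A (Main N A)

-- ===== LEMMAS AND PROOFS =====

lemma scanOdd1_eq_all (l : List (Int × Int)) :
    scanOdd1 l = l.all (fun p => p.2 == 2 * p.1 + 1) := by
  induction l with
  | nil => rfl
  | cons p t ih =>
    obtain ⟨i, e⟩ := p
    simp only [scanOdd1, List.all_cons, ih]
    by_cases h : e = 2 * i + 1 <;> simp [h]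

lemma scanEven2_eq_all (l : List (Int × Int)) :
    scanEven2 l = l.all (fun p => p.2 == 2 * p.1 + 2) := by
  induction l with
  | nil => rfl
  | cons p t ih =>
    obtain ⟨i, e⟩ := p
    simp only [scanEven2, List.all_cons, ih]
    by_cases h : e = 2 * (i + 1) <;> simp [h] <;> omega

lemma mintPow2_eq (m : Nat) : mintPow2 m = (2 ^ m : Int) % 1000000007 := by
  induction m using Nat.strong_induction_on with
  | _ m ih =>
    by_cases h : m = 0
    · subst h; simp [mintPow2]
    · rw [mintPow2]
      simp only [h, dif_neg, not_false_iff]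
      have ihq := ih (m / 2) (Nat.div_lt_self (Nat.pos_of_ne_zero h) one_lt_two)
      have hpow : (2 ^ m : Int) = 2 ^ (m / 2) * 2 ^ (m / 2) * 2 ^ (m % 2) := by
        rw [← pow_add, ← pow_add]; congr 1; omega
      by_cases hr : m % 2 = 1
      · rw [if_pos hr, ihq, hpow, hr, pow_one, ← Int.mul_emod]
        conv_rhs => rw [Int.mul_emod]
        norm_num
      · have hr0 : m % 2 = 0 := by omega
        rw [if_neg hr, ihq, hpow, hr0, pow_zero, mul_one, ← Int.mul_emod]

lemma setLen_le_one (v0 : Int) (vs : List Int) :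
    (PySem.Set.ofList (v0 :: vs)).length ≤ 1 ↔ ∀ v ∈ vs, v = v0 := by
  rw [PySem.Set.ofList_cons]
  have hle : ∀ m : Nat, m + 1 ≤ 1 ↔ m = 0 := by omega
  rw [List.length_cons, hle, List.length_eq_zero_iff, List.eq_nil_iff_forall_not_mem]
  constructor
  · intro h v hv
    by_contra hne
    exact h v (by rw [PySem.Set.mem_discard]; exact ⟨(PySem.Set.mem_ofList _ _).2 hv, hne⟩)
  · intro h y hy
    rw [PySem.Set.mem_discard, PySem.Set.mem_ofList] at hy
    exact hy.2 (h y hy.1)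

-- the key characterisation: the sorted-keys index scan over a duplicate-free key list
-- succeeds iff every key satisfies the closed-form parity/bound condition
lemma sorted_target (ks : List Int) (hnd : ks.Nodup) (off : Int) (hoff : off = 1 ∨ off = 2) :
    ((PySem.List.enumerate (PySem.List.sorted ks (fun x => x) false)).all
        (fun p => p.2 == 2 * p.1 + off) = true)
    ↔ ∀ k ∈ ks, PySem.Int.mod k 2 = 2 - off ∧ 1 ≤ k ∧ k ≤ 2 * (ks.length : Int) - 2 + off := by
  have hmod2 : ∀ k : Int, PySem.Int.mod k 2 = k % 2 :=
    fun k => PySem.Int.mod_eq_emod_of_pos (by norm_num)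
  set xs := PySem.List.sorted ks (fun x => x) false with hxs
  set target : List Int := (List.range ks.length).map (fun (i : Nat) => 2 * ((i : Nat) : Int) + off) with htarget
  have hlen_t : target.length = ks.length := by simp [htarget]
  have hlen_s : xs.length = ks.length := PySem.List.length_sorted ks _ false
  have hmem_t : ∀ k : Int,
      k ∈ target ↔ (PySem.Int.mod k 2 = 2 - off ∧ 1 ≤ k ∧ k ≤ 2 * (ks.length : Int) - 2 + off) := by
    intro k
    rw [hmod2]
    simp only [htarget, List.mem_map, List.mem_range]
    constructor
    · rintro ⟨i, hi, rfl⟩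
      rcases hoff with rfl | rfl <;> refine ⟨by omega, by omega, by omega⟩
    · rintro ⟨hp, h1, h2⟩
      refine ⟨((k - off).toNat) / 2, ?_, ?_⟩ <;> rcases hoff with rfl | rfl <;> omega
  have hall : ((PySem.List.enumerate xs).all (fun p => p.2 == 2 * p.1 + off) = true)
      ↔ xs = target := by
    rw [List.all_eq_true]
    constructor
    · intro h
      apply List.ext_getElem (by rw [hlen_s, hlen_t])
      intro j hj1 hj2
      have hje : j < (PySem.List.enumerate xs).length := by
        rw [PySem.List.length_enumerate]; exact hj1
      have hmem := List.getElem_mem hje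
      have hj := h _ hmem
      rw [PySem.List.getElem_enumerate] at hj
      simp only [beq_iff_eq] at hj
      simp only [htarget, List.getElem_map, List.getElem_range]
      rw [hj]; ring
    · intro heq p hp
      rw [PySem.List.mem_enumerate_iff] at hp
      obtain ⟨j, hj, rfl⟩ := hp
      simp only [beq_iff_eq]
      have : xs[j] = 2 * (j : Int) + off := by
        have := List.getElem_of_eq heq hj
        rw [this]
        simp [htarget]
      rw [this]; ring
  rw [hall]
  constructor
  · intro heq k hk
    have hmem : k ∈ target := by
      rw [← heq]
      exact (PySem.List.mem_sorted ks _ false k).2 hk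
    exact (hmem_t k).1 hmem
  · intro h
    have hsub : ks ⊆ target := fun k hk => (hmem_t k).2 (h k hk)
    have hpw : target.Pairwise (· < ·) := by
      simp only [htarget, List.pairwise_map]
      exact List.pairwise_lt_range.imp (by intro a b hab; omega)
    have hperm : target.Perm ks :=
      ((List.subperm_of_subset hnd hsub).perm_of_length_le (by rw [hlen_t])).symm
    exact PySem.List.sorted_eq_of_perm_of_pairwise_lt ks target (fun x => x) hperm hpw

-- the common tail of both branches: A's value-set test + sorted-keys scan equals B's single pass
lemma branch_eq (dct : PySem.Dict Int Int) (ks : List Int) (cnt : Int → Int)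
    (hitems : dct.items = ks.map (fun k => (k, cnt k))) (hnd : ks.Nodup)
    (n : Nat) (off : Int) (hoff : off = 1 ∨ off = 2)
    (sc : List (Int × Int) → Bool)
    (hsc : ∀ l, sc l = l.all (fun p => p.2 == 2 * p.1 + off)) :
    (if (PySem.Set.ofList dct.values).length > 1 then 0
     else if sc (PySem.List.enumerate (PySem.List.sorted dct.keys (fun x => x) false))
          then mintPow2 (n / 2) else (0 : Int))
    = finishB dct n (off - 1) := by
  have hkeys : dct.keys = ks := by
    simp [PySem.Dict.keys, hitems, List.map_map, Function.comp_def]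
  have hvals : dct.values = ks.map cnt := by
    simp [PySem.Dict.values, hitems, List.map_map, Function.comp_def]
  have hsize : dct.size = ks.length := by
    simp [PySem.Dict.size, hitems]
  have hpow : mintPow2 (n / 2) = PySem.Int.powMod 2 (n / 2) 1000000007 := by
    rw [mintPow2_eq]
    show _ = PySem.Int.mod _ _
    rw [PySem.Int.mod_eq_emod_of_pos (by norm_num)]
  have harith1 : (1 : Int) - (off - 1) = 2 - off := by ring
  have harith2 : ∀ d : Int, 2 * d - 1 + (off - 1) = 2 * d - 2 + off := by intro d; ring
  rw [hsc, hkeys, hvals]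
  simp only [finishB, hitems, hsize, harith1, harith2]
  have hQ := sorted_target ks hnd off hoff
  cases ks with
  | nil =>
    rw [show PySem.List.sorted ([] : List Int) (fun x => x) false = [] from rfl]
    simp [hpow]
  | cons k0 kt =>
    simp only [List.map_cons, List.headD_cons]
    -- c0 = cnt k0
    have hP : ((PySem.Set.ofList (cnt k0 :: List.map cnt kt)).length ≤ 1) ↔
        ∀ k ∈ (k0 :: kt), cnt k = cnt k0 := by
      rw [setLen_le_one]
      simp
    have hBall : (((k0, cnt k0) :: List.map (fun k => (k, cnt k)) kt).all (fun kv =>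
          kv.2 == cnt k0 && (PySem.Int.mod kv.1 2 == 2 - off) &&
          decide (1 ≤ kv.1) && decide (kv.1 ≤ 2 * ((k0 :: kt).length : Int) - 2 + off)) = true)
        ↔ ((∀ k ∈ (k0 :: kt), cnt k = cnt k0) ∧
           ∀ k ∈ (k0 :: kt), PySem.Int.mod k 2 = 2 - off ∧ 1 ≤ k ∧
             k ≤ 2 * ((k0 :: kt).length : Int) - 2 + off) := by
      rw [show ((k0, cnt k0) :: List.map (fun k => (k, cnt k)) kt) =
            (k0 :: kt).map (fun k => (k, cnt k)) from by simp]
      simp only [List.all_map, List.all_eq_true, Function.comp_apply, Bool.and_eq_true,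
        beq_iff_eq, decide_eq_true_eq, and_assoc]
      exact ⟨fun h => ⟨fun k hk => (h k hk).1, fun k hk => (h k hk).2⟩,
             fun h k hk => ⟨h.1 k hk, h.2 k hk⟩⟩
    by_cases hPp : ∀ k ∈ (k0 :: kt), cnt k = cnt k0
    · by_cases hQp : ∀ k ∈ (k0 :: kt), PySem.Int.mod k 2 = 2 - off ∧ 1 ≤ k ∧
          k ≤ 2 * ((k0 :: kt).length : Int) - 2 + off
      · rw [if_neg (by simp only [gt_iff_lt, not_lt]; exact hP.2 hPp),
            if_pos (hQ.2 hQp), if_pos (hBall.2 ⟨hPp, hQp⟩), hpow]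
      · rw [if_neg (by simp only [gt_iff_lt, not_lt]; exact hP.2 hPp),
            if_neg (fun hc => hQp (hQ.1 hc)),
            if_neg (fun hc => hQp (hBall.1 hc).2)]
    · rw [if_pos (by rw [gt_iff_lt, lt_iff_not_ge]; exact fun hc => hPp (hP.1 hc)),
          if_neg (fun hc => hPp (hBall.1 hc).1)]

-- ===== VERDICT (by name: the statement is the Claim_ definition above) =====
theorem Main_spec : Claim_equal_Main := by
  intro N A _
  show Main N A = Main_alt N A
  simp only [Main, Main_alt, PySem.Dict.foldl_insert_getD_add_one_eq_counter]
  have hnd := PySem.Set.nodup_ofList A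
  have hitems := PySem.Dict.items_counter A
  have hmodn : PySem.Int.mod ((A.length : Nat) : Int) 2 = ((A.length % 2 : Nat) : Int) := by
    exact_mod_cast PySem.Int.mod_natCast A.length 2
  by_cases hpar : A.length % 2 = 0
  · -- even length
    have hodd0 : PySem.Int.mod ((A.length : Nat) : Int) 2 = 0 := by rw [hmodn, hpar]; rfl
    rw [if_pos hpar, hodd0, if_neg (show ¬((0 : Int) ≠ 0) by simp)]
    have h := branch_eq (PySem.Dict.counter A) (PySem.Set.ofList A)
      (fun k => ((List.count k A : Nat) : Int)) hitems hnd A.length 1 (Or.inl rfl)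
      scanOdd1 scanOdd1_eq_all
    simpa using h
  · -- odd length
    have hpar1 : A.length % 2 = 1 := by omega
    have hodd1 : PySem.Int.mod ((A.length : Nat) : Int) 2 = 1 := by rw [hmodn, hpar1]; rfl
    rw [if_neg hpar, hodd1, if_pos (show (1 : Int) ≠ 0 by norm_num)]
    by_cases h0 : (0 : Int) ∈ A
    · have hcont : (PySem.Dict.counter A).contains 0 = true := by
        rw [PySem.Dict.contains_counter]; simpa using h0
      have hgd : (PySem.Dict.counter A).getD 0 0 = ((List.count (0 : Int) A : Nat) : Int) :=
        PySem.Dict.getD_counter A 0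
      have hget : (PySem.Dict.counter A).get? 0 = some ((List.count (0 : Int) A : Nat) : Int) :=
        PySem.Dict.get?_of_mem_items _
          (by rw [hitems]; exact List.mem_map.2 ⟨0, (PySem.Set.mem_ofList _ _).2 h0, rfl⟩)
          (PySem.Dict.nodup_keys_counter A)
      rw [if_neg (show ¬¬((PySem.Dict.counter A).contains 0 = true) by simp [hcont])]
      by_cases hc1 : List.count (0 : Int) A = 1
      · rw [if_neg (show ¬((PySem.Dict.counter A).contains 0 = true ∧
              (PySem.Dict.counter A).getD 0 0 ≠ 1) by simp [hcont, hgd, hc1]),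
            if_neg (show ¬((PySem.Dict.counter A).get? 0 ≠ some 1) by simp [hget, hc1])]
        have hitems' : ((PySem.Dict.counter A).erase 0).items =
            ((PySem.Set.ofList A).filter (fun k => !(k == 0))).map
              (fun k => (k, ((List.count k A : Nat) : Int))) := by
          show ((PySem.Dict.counter A).items.filter _) = _
          rw [hitems, List.filter_map]
          rfl
        have hnd' : (((PySem.Set.ofList A).filter (fun k => !(k == 0))) : List Int).Nodup :=
          hnd.filter _
        have h := branch_eq ((PySem.Dict.counter A).erase 0) _ _ hitems' hnd' A.length 2
          (Or.inr rfl) scanEven2 scanEven2_eq_all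
        simpa using h
      · rw [if_pos ⟨hcont, by rw [hgd]; exact_mod_cast hc1⟩,
            if_pos (show (PySem.Dict.counter A).get? 0 ≠ some 1 by simp [hget]; exact_mod_cast hc1)]
    · have hget : (PySem.Dict.counter A).get? 0 = none := by
        rw [PySem.Dict.get?_eq_none_iff_not_mem_keys, PySem.Dict.keys_counter]
        rw [PySem.Set.mem_ofList]; exact h0
      have hcont : (PySem.Dict.counter A).contains 0 = false := by
        rw [PySem.Dict.contains_counter]; simpa using h0
      rw [if_pos (show ¬((PySem.Dict.counter A).contains 0 = true) by simp [hcont]),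
          if_pos (show (PySem.Dict.counter A).get? 0 ≠ some 1 by simp [hget])]
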